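-- pv_equiv track=rewrite | github.com/prasannavl/nix | scripts/archive/cloudflare-export.py | resource_group_from_zone_names
-- ===== SOURCE A (Python) =====
-- def resource_group_from_zone_names(zone_names, zone_groups):
--     groups = {
--         zone_groups[zone_name]
--         for zone_name in zone_names
--         if zone_name in zone_groups
--     }
--     if len(groups) == 1:
--         return next(iter(groups))
--     return "account"
-- ===== SOURCE B (Python) =====
-- def resource_group_from_zone_names(zone_names, zone_groups):
--     found = False
--     candidate = None
--     for zone_name in zone_names:
--         g = zone_groups.get(zone_name)
--         if g is None:
--             continue
--         if not found:
--             candidate = g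
--             found = True
--         elif g != candidate:
--             return "account"
--     return candidate if found else "account"
-- ===== Notes on version B (the rewrite author's own statement) =====
-- stated objective: simpler
-- what changed: Single pass keeping one scalar candidate plus a found flag, returning 'account' immediately on the second distinct group, instead of materialising a set of all distinct groups and inspecting its size afterwards.
import Mathlib
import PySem

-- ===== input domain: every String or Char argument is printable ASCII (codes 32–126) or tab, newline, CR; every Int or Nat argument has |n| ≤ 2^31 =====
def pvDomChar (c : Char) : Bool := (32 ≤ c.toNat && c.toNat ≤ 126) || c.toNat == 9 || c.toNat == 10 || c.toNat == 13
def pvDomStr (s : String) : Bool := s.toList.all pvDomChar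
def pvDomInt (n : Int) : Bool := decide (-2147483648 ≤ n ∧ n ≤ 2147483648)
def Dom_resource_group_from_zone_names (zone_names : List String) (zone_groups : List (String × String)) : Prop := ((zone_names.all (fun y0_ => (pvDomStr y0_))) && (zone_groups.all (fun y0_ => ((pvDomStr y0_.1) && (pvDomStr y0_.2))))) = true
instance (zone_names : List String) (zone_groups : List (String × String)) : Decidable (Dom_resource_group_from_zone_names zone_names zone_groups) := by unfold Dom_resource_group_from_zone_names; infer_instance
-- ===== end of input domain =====

-- B replaces A's set of all distinct groups by a single-pass scalar candidate with an
-- early exit on the second distinct group (objective: simpler; return value only).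

-- ===== PORT A =====
def resource_group_from_zone_names (zone_names : List String) (zone_groups : List (String × String)) : String :=
  let d : PySem.Dict String String := PySem.Dict.mk zone_groups
  let groups : PySem.Set String :=
    zone_names.foldl (fun s zone_name =>
      if d.contains zone_name then PySem.Set.add s (d.getD zone_name "") else s)
      PySem.Set.empty
  if groups.length = 1 then groups.headD "account" else "account"

-- ===== PORT B =====
def pvGoB (d : PySem.Dict String String) : List String → Option String → String
  | [], none => "account"
  | [], some c => c
  | zone_name :: rest, acc =>
    match d.get? zone_name with
    | none => pvGoB d rest acc
    | some g =>
      match acc with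
      | none => pvGoB d rest (some g)
      | some c => if g == c then pvGoB d rest (some c) else "account"

def resource_group_from_zone_names_alt (zone_names : List String) (zone_groups : List (String × String)) : String :=
  pvGoB (PySem.Dict.mk zone_groups) zone_names none

-- ===== PRECONDITION & SPEC =====
def Spec_resource_group_from_zone_names (zone_names : List String) (zone_groups : List (String × String)) (out : String) : Prop := out = resource_group_from_zone_names_alt zone_names zone_groups
instance (zone_names : List String) (zone_groups : List (String × String)) (out : String) : Decidable (Spec_resource_group_from_zone_names zone_names zone_groups out) := by unfold Spec_resource_group_from_zone_names; infer_instance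

-- ===== CLAIM (what is proved, stated in full; the proofs are below) =====
def Claim_equal_resource_group_from_zone_names : Prop := ∀ (zone_names : List String) (zone_groups : List (String × String)), Dom_resource_group_from_zone_names zone_names zone_groups → Spec_resource_group_from_zone_names zone_names zone_groups (resource_group_from_zone_names zone_names zone_groups)

-- ===== LEMMAS AND PROOFS =====

-- A's loop step and final read-off, abstracted for the proofs
def pvStepA (d : PySem.Dict String String) (s : PySem.Set String) (n : String) : PySem.Set String :=
  if d.contains n then PySem.Set.add s (d.getD n "") else s

def pvFinA (s : PySem.Set String) : String :=
  if s.length = 1 then s.headD "account" else "account"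

lemma pvStepA_none (d : PySem.Dict String String) (s : PySem.Set String) (n : String)
    (h : d.get? n = none) : pvStepA d s n = s := by
  simp [pvStepA, PySem.Dict.contains_eq_isSome_get?, h]

lemma pvStepA_some (d : PySem.Dict String String) (s : PySem.Set String) (n g : String)
    (h : d.get? n = some g) : pvStepA d s n = PySem.Set.add s g := by
  simp [pvStepA, PySem.Dict.contains_eq_isSome_get?, h, PySem.Dict.getD_eq_get?_getD]

lemma pvStepA_len (d : PySem.Dict String String) (s : PySem.Set String) (n : String) :
    s.length ≤ (pvStepA d s n).length := by
  unfold pvStepA PySem.Set.add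
  split
  · split <;> simp
  · exact le_rfl

lemma pvFinA_big (d : PySem.Dict String String) (names : List String) (s : PySem.Set String)
    (h : 2 ≤ s.length) : pvFinA (names.foldl (pvStepA d) s) = "account" := by
  induction names generalizing s with
  | nil =>
    rw [List.foldl_nil]; unfold pvFinA; rw [if_neg (by omega)]
  | cons n rest ih =>
    rw [List.foldl_cons]
    exact ih _ (le_trans h (pvStepA_len d s n))

lemma pvFoldA_one (d : PySem.Dict String String) (names : List String) (c : String) :
    pvFinA (names.foldl (pvStepA d) [c]) = pvGoB d names (some c) := by
  induction names with
  | nil => simp [pvFinA, pvGoB]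
  | cons n rest ih =>
    rw [List.foldl_cons]
    cases h : d.get? n with
    | none => rw [pvStepA_none d _ n h]; simpa [pvGoB, h] using ih
    | some g =>
      rw [pvStepA_some d _ n g h]
      by_cases hg : g = c
      · subst hg
        have : PySem.Set.add [g] g = [g] := by simp [PySem.Set.add, PySem.Set.contains]
        rw [this]
        simpa [pvGoB, h] using ih
      · have : PySem.Set.add [c] g = [c, g] := by
          simp [PySem.Set.add, PySem.Set.contains, hg]
        rw [this]
        have hb : (g == c) = false := by simp [hg]
        simp [pvGoB, h, hb, pvFinA_big d rest [c, g] (by simp)]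

lemma pvFoldA_emp (d : PySem.Dict String String) (names : List String) :
    pvFinA (names.foldl (pvStepA d) []) = pvGoB d names none := by
  induction names with
  | nil => simp [pvFinA, pvGoB]
  | cons n rest ih =>
    rw [List.foldl_cons]
    cases h : d.get? n with
    | none => rw [pvStepA_none d _ n h]; simpa [pvGoB, h] using ih
    | some g =>
      rw [pvStepA_some d _ n g h]
      have : PySem.Set.add [] g = [g] := by simp [PySem.Set.add, PySem.Set.contains]
      rw [this]
      simp [pvGoB, h, pvFoldA_one d rest g]

-- ===== VERDICT (by name: the statement is the Claim_ definition above) =====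
theorem resource_group_from_zone_names_spec : Claim_equal_resource_group_from_zone_names := by
  intro zone_names zone_groups _
  unfold Spec_resource_group_from_zone_names resource_group_from_zone_names
    resource_group_from_zone_names_alt
  have := pvFoldA_emp (PySem.Dict.mk zone_groups) zone_names
  simpa [pvFinA, pvStepA, PySem.Set.empty] using this
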